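-- pv_equiv track=rewrite | github.com/Madhu733/Python | stringsN (1).py | isdigit1
-- ===== SOURCE A (Python) =====
-- def isdigit1(a):
--     n=0
--     for i in a:
--         if ord(i)>=33 and ord(i)<=64:
--             n+=1
--         else:
--             continue
--     if n==len(a):
--         return True
--     else:
--         return False
-- ===== SOURCE B (Python) =====
-- def isdigit1(a):
--     # min/max aggregate pass instead of counting matches
--     if not a:
--         return True
--     lo = min(ord(c) for c in a)
--     hi = max(ord(c) for c in a)
--     return lo >= 33 and hi <= 64
-- ===== Notes on version B (the rewrite author's own statement) =====
-- stated objective: alternative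
-- what changed: B computes the minimum and maximum character ordinal and tests both bounds (with an empty-string guard), instead of counting qualifying characters and comparing the count to the length.
import Mathlib
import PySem

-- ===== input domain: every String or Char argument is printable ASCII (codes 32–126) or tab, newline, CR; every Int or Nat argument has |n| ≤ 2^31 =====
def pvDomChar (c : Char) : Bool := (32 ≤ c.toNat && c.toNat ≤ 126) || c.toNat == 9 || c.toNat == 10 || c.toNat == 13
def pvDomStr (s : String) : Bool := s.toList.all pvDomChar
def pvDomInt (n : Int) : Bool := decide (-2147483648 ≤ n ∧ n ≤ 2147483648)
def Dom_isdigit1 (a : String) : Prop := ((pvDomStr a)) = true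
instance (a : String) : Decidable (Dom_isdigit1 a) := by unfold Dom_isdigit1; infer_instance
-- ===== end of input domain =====

-- B replaces A's match-count-equals-length test by a min/max-ordinal bounds test (alternative decomposition, same cost).


-- ===== PORT A =====
-- A: count characters with 33 ≤ ord ≤ 64, then compare the count to the length.
def isdigit1 (a : String) : Bool :=
  let n : Nat := a.toList.foldl (fun n i => if 33 ≤ i.toNat ∧ i.toNat ≤ 64 then n + 1 else n) 0
  if n = a.toList.length then true else false

-- ===== PORT B =====
-- B: empty string → True; otherwise min ord ≥ 33 and max ord ≤ 64.
def isdigit1_alt (a : String) : Bool :=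
  match a.toList with
  | [] => true
  | c :: cs =>
    let lo := cs.foldl (fun m i => min m i.toNat) c.toNat
    let hi := cs.foldl (fun m i => max m i.toNat) c.toNat
    decide (33 ≤ lo ∧ hi ≤ 64)

-- ===== PRECONDITION & SPEC =====
def Spec_isdigit1 (a : String) (out : Bool) : Prop := out = isdigit1_alt a
instance (a : String) (out : Bool) : Decidable (Spec_isdigit1 a out) := by unfold Spec_isdigit1; infer_instance

-- ===== CLAIM (what is proved, stated in full; the proofs are below) =====
def Claim_equal_isdigit1 : Prop := ∀ (a : String), Dom_isdigit1 a → Spec_isdigit1 a (isdigit1 a)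

-- ===== LEMMAS AND PROOFS =====

def pvOkB (c : Char) : Bool := decide (33 ≤ c.toNat ∧ c.toNat ≤ 64)

theorem countFold_eq (l : List Char) (n : Nat) :
    l.foldl (fun n i => if 33 ≤ i.toNat ∧ i.toNat ≤ 64 then n + 1 else n) n
      = n + l.countP pvOkB := by
  induction l generalizing n with
  | nil => simp
  | cons c cs ih =>
    simp only [List.foldl_cons, List.countP_cons, ih, pvOkB]
    by_cases h : 33 ≤ c.toNat ∧ c.toNat ≤ 64
    · simp [h]; omega
    · simp [h]

theorem a_iff (l : List Char) :
    (l.foldl (fun n i => if 33 ≤ i.toNat ∧ i.toNat ≤ 64 then n + 1 else n) 0 = l.length)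
      ↔ ∀ c ∈ l, 33 ≤ c.toNat ∧ c.toNat ≤ 64 := by
  rw [countFold_eq]
  simp only [Nat.zero_add]
  rw [List.countP_eq_length]
  constructor
  · intro h c hc
    simpa [pvOkB] using h c hc
  · intro h c hc
    simpa [pvOkB] using h c hc

theorem foldMin_ge (cs : List Char) (m k : Nat) :
    k ≤ cs.foldl (fun m i => min m i.toNat) m ↔ (k ≤ m ∧ ∀ c ∈ cs, k ≤ c.toNat) := by
  induction cs generalizing m with
  | nil => simp
  | cons c cs ih =>
    simp only [List.foldl_cons, ih, le_min_iff, List.mem_cons]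
    constructor
    · rintro ⟨⟨h1, h2⟩, h3⟩
      exact ⟨h1, fun d hd => hd.elim (fun e => e ▸ h2) (h3 d)⟩
    · rintro ⟨h1, h2⟩
      exact ⟨⟨h1, h2 c (Or.inl rfl)⟩, fun d hd => h2 d (Or.inr hd)⟩

theorem foldMax_le (cs : List Char) (m k : Nat) :
    cs.foldl (fun m i => max m i.toNat) m ≤ k ↔ (m ≤ k ∧ ∀ c ∈ cs, c.toNat ≤ k) := by
  induction cs generalizing m with
  | nil => simp
  | cons c cs ih =>
    simp only [List.foldl_cons, ih, max_le_iff, List.mem_cons]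
    constructor
    · rintro ⟨⟨h1, h2⟩, h3⟩
      exact ⟨h1, fun d hd => hd.elim (fun e => e ▸ h2) (h3 d)⟩
    · rintro ⟨h1, h2⟩
      exact ⟨⟨h1, h2 c (Or.inl rfl)⟩, fun d hd => h2 d (Or.inr hd)⟩

theorem b_iff (a : String) : isdigit1_alt a = true ↔ ∀ c ∈ a.toList, 33 ≤ c.toNat ∧ c.toNat ≤ 64 := by
  unfold isdigit1_alt
  cases h : a.toList with
  | nil => simp
  | cons c cs =>
    simp only [decide_eq_true_eq, foldMin_ge, foldMax_le, List.mem_cons]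
    constructor
    · rintro ⟨⟨h1, h2⟩, h3, h4⟩ d hd
      rcases hd with rfl | hd
      · exact ⟨h1, h3⟩
      · exact ⟨h2 d hd, h4 d hd⟩
    · intro h
      exact ⟨⟨(h c (Or.inl rfl)).1, fun d hd => (h d (Or.inr hd)).1⟩,
             (h c (Or.inl rfl)).2, fun d hd => (h d (Or.inr hd)).2⟩

-- ===== VERDICT (by name: the statement is the Claim_ definition above) =====
theorem isdigit1_spec : Claim_equal_isdigit1 := by
  intro a _
  unfold Spec_isdigit1 isdigit1
  simp only []
  by_cases h : ∀ c ∈ a.toList, 33 ≤ c.toNat ∧ c.toNat ≤ 64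
  · rw [if_pos ((a_iff a.toList).mpr h), (b_iff a).mpr h]
  · rw [if_neg (fun hc => h ((a_iff a.toList).mp hc))]
    exact (Bool.eq_false_iff.mpr (fun hb => h ((b_iff a).mp hb))).symm
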